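-- pv_equiv track=rewrite | github.com/pmukeshreddy/CodeSight | ares/graph/query.py | _trim_source_to_diff
-- ===== SOURCE A (Python) =====
-- def _trim_source_to_diff(
--
--     full_source: str,
--     func_line_start: int,
--     filepath: str,
--     diff_hunks: dict[str, list[dict]] | None,
--     context_lines: int = 10,
--     max_lines: int = 60,
-- ) -> str:
--     """Return a trimmed version of the function source, keeping only lines
--     near diff hunks plus surrounding context. Functions shorter than
--     *max_lines* are returned as-is."""
--     lines = full_source.splitlines()
--     if len(lines) <= max_lines or not diff_hunks:
--         return full_source
--     hunks = diff_hunks.get(filepath, [])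
--     if not hunks:
--         # No hunks for this file — return signature + first/last few lines
--         return "\n".join(lines[:max_lines])
--     # Convert hunk line numbers (file-absolute) to function-relative
--     keep = set()
--     # Always keep the signature (first 2 lines)
--     keep.update(range(0, min(2, len(lines))))
--     for hunk in hunks:
--         rel_start = hunk["start"] - func_line_start
--         rel_end = hunk["end"] - func_line_start
--         for i in range(
--             max(0, rel_start - context_lines),
--             min(len(lines), rel_end + context_lines + 1),
--         ):
--             keep.add(i)
--     # Always keep last line (closing bracket/return)
--     if lines:
--         keep.add(len(lines) - 1)
--     kept = sorted(keep)
--     result = []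
--     prev = -1
--     for i in kept:
--         if prev >= 0 and i > prev + 1:
--             result.append(f"    # ... ({i - prev - 1} lines omitted)")
--         result.append(lines[i])
--         prev = i
--     return "\n".join(result)
-- ===== SOURCE B (Python) =====
-- def _trim_source_to_diff(
--     full_source: str,
--     func_line_start: int,
--     filepath: str,
--     diff_hunks: dict[str, list[dict]] | None,
--     context_lines: int = 10,
--     max_lines: int = 60,
-- ) -> str:
--     """Single pass over the line indices with a per-line keep predicate:
--     no keep-set is built and nothing is sorted."""
--     lines = full_source.splitlines()
--     n = len(lines)
--     if n <= max_lines or not diff_hunks: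
--         return full_source
--     hunks = diff_hunks.get(filepath, [])
--     if not hunks:
--         return "\n".join(lines[:max_lines])
--
--     def kept(i):
--         if i < min(2, n) or i == n - 1:
--             return True
--         return any(
--             max(0, h["start"] - func_line_start - context_lines) <= i
--             < min(n, h["end"] - func_line_start + context_lines + 1)
--             for h in hunks
--         )
--
--     result = []
--     prev = -1
--     for i in range(n):
--         if kept(i):
--             if prev >= 0 and i > prev + 1:
--                 result.append(f"    # ... ({i - prev - 1} lines omitted)")
--             result.append(lines[i])
--             prev = i
--     return "\n".join(result)
-- ===== Notes on version B (the rewrite author's own statement) =====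
-- stated objective: alternative
-- what changed: B drops A's keep-set accumulation and sort entirely: it makes a single in-order pass over the line indices with a per-line keep predicate (signature / last line / inside some hunk's clamped context window) and emits lines and omission markers on the fly.
import Mathlib
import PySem

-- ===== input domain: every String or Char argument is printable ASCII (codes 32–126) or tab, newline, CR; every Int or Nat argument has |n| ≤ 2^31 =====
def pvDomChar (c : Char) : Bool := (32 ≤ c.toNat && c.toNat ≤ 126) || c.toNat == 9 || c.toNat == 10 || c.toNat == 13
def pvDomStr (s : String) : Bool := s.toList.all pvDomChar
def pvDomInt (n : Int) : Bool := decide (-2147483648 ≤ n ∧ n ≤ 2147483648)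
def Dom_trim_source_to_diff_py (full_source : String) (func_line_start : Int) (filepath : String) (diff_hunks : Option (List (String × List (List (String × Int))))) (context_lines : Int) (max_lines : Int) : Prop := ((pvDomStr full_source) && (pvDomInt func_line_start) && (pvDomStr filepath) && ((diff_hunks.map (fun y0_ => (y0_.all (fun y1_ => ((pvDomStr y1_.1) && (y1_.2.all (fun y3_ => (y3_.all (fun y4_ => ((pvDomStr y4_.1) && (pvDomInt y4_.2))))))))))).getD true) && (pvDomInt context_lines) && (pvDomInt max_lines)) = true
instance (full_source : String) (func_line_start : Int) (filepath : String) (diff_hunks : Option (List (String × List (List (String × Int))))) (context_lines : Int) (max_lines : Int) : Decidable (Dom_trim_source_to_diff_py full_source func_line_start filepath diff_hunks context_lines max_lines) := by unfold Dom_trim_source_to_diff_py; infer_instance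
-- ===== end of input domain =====

-- B replaces A's keep-set + sort with a single pass over the line indices and a per-line
-- keep predicate tested directly against the hunks (objective: alternative, not faster).

-- ===== PORT A =====
-- shared emission step: both Pythons run the identical loop body
-- 'if prev >= 0 and i > prev+1: append marker; append lines[i]; prev = i'
def pvEmit (lines : List String) (st : List String × Int) (i : Int) : List String × Int :=
  let result := if st.2 ≥ 0 ∧ i > st.2 + 1 then
      st.1 ++ ["    # ... (" ++ PySem.Int.toStr (i - st.2 - 1) ++ " lines omitted)"]
    else st.1
  (result ++ [PySem.List.pyGetD lines i ""], i)

-- A's keep-set: signature lines, each hunk's context window, and the last line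
def pvKeepSet (lines : List String) (hunks : List (List (String × Int)))
    (func_line_start context_lines : Int) : PySem.Set Int :=
  let n : Int := (lines.length : Int)
  let keep := PySem.Set.update PySem.Set.empty (PySem.List.pyRange 0 (min 2 n) 1)
  let keep := hunks.foldl (fun keep hunk =>
    let rel_start := ((PySem.Dict.mk hunk).get? "start").getD 0 - func_line_start
    let rel_end := ((PySem.Dict.mk hunk).get? "end").getD 0 - func_line_start
    PySem.Set.update keep
      (PySem.List.pyRange (max 0 (rel_start - context_lines)) (min n (rel_end + context_lines + 1)) 1)) keep
  if lines ≠ [] then PySem.Set.add keep (n - 1) else keep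

def trim_source_to_diff_py (full_source : String) (func_line_start : Int) (filepath : String) (diff_hunks : Option (List (String × List (List (String × Int))))) (context_lines : Int) (max_lines : Int) : String :=
  let lines := PySem.Str.splitlines full_source
  if ((lines.length : Int) ≤ max_lines ∨ diff_hunks.getD [] = []) then full_source
  else
    let hunks := ((PySem.Dict.mk (diff_hunks.getD [])).get? filepath).getD []
    if hunks = [] then PySem.Str.join "\n" (PySem.List.slice lines none (some max_lines))
    else
      let kept := PySem.List.sorted (pvKeepSet lines hunks func_line_start context_lines) (fun x => x) false
      PySem.Str.join "\n" (kept.foldl (pvEmit lines) ([], -1)).1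

-- ===== PORT B =====
-- B's per-line predicate: signature or last line, or inside some hunk's clamped context window
def pvKept (n func_line_start context_lines : Int) (hunks : List (List (String × Int))) (i : Int) : Bool :=
  if i < min 2 n ∨ i = n - 1 then true
  else hunks.any (fun h =>
    decide (max 0 (((PySem.Dict.mk h).get? "start").getD 0 - func_line_start - context_lines) ≤ i ∧
      i < min n (((PySem.Dict.mk h).get? "end").getD 0 - func_line_start + context_lines + 1)))

def trim_source_to_diff_py_alt (full_source : String) (func_line_start : Int) (filepath : String) (diff_hunks : Option (List (String × List (List (String × Int))))) (context_lines : Int) (max_lines : Int) : String :=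
  let lines := PySem.Str.splitlines full_source
  let n : Int := (lines.length : Int)
  if ((lines.length : Int) ≤ max_lines ∨ diff_hunks.getD [] = []) then full_source
  else
    let hunks := ((PySem.Dict.mk (diff_hunks.getD [])).get? filepath).getD []
    if hunks = [] then PySem.Str.join "\n" (PySem.List.slice lines none (some max_lines))
    else
      PySem.Str.join "\n"
        (((PySem.List.pyRange 0 n 1).foldl
          (fun st i => if pvKept n func_line_start context_lines hunks i then pvEmit lines st i else st)
          ([], -1)).1)

-- ===== PRECONDITION & SPEC =====
-- Pre_ excludes exactly the inputs where Python A raises KeyError: the trimming loop is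
-- reached (long source, hunks present for this file) and some hunk lacks a "start" or "end" key.
def Pre_trim_source_to_diff_py (full_source : String) (func_line_start : Int) (filepath : String) (diff_hunks : Option (List (String × List (List (String × Int))))) (context_lines : Int) (max_lines : Int) : Prop :=
  (((PySem.Str.splitlines full_source).length : Int) ≤ max_lines ∨ diff_hunks.getD [] = []) ∨
  ∀ h ∈ (((PySem.Dict.mk (diff_hunks.getD [])).get? filepath).getD []),
    ((PySem.Dict.mk h).get? "start").isSome = true ∧ ((PySem.Dict.mk h).get? "end").isSome = true
instance (full_source : String) (func_line_start : Int) (filepath : String) (diff_hunks : Option (List (String × List (List (String × Int))))) (context_lines : Int) (max_lines : Int) : Decidable (Pre_trim_source_to_diff_py full_source func_line_start filepath diff_hunks context_lines max_lines) := by unfold Pre_trim_source_to_diff_py; infer_instance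

def pvWitness_trim_source_to_diff_py : String × Int × String × (Option (List (String × List (List (String × Int))))) × Int × Int :=
  ("a\nb\nc", 1, "f.py", some [("f.py", [[("start", 2), ("end", 2)]])], 1, 2)

def Spec_trim_source_to_diff_py (full_source : String) (func_line_start : Int) (filepath : String) (diff_hunks : Option (List (String × List (List (String × Int))))) (context_lines : Int) (max_lines : Int) (out : String) : Prop := out = trim_source_to_diff_py_alt full_source func_line_start filepath diff_hunks context_lines max_lines
instance (full_source : String) (func_line_start : Int) (filepath : String) (diff_hunks : Option (List (String × List (List (String × Int))))) (context_lines : Int) (max_lines : Int) (out : String) : Decidable (Spec_trim_source_to_diff_py full_source func_line_start filepath diff_hunks context_lines max_lines out) := by unfold Spec_trim_source_to_diff_py; infer_instance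

-- ===== CLAIM (what is proved, stated in full; the proofs are below) =====
def Claim_equal_trim_source_to_diff_py : Prop := ∀ (full_source : String) (func_line_start : Int) (filepath : String) (diff_hunks : Option (List (String × List (List (String × Int))))) (context_lines : Int) (max_lines : Int), Dom_trim_source_to_diff_py full_source func_line_start filepath diff_hunks context_lines max_lines → Pre_trim_source_to_diff_py full_source func_line_start filepath diff_hunks context_lines max_lines → Spec_trim_source_to_diff_py full_source func_line_start filepath diff_hunks context_lines max_lines (trim_source_to_diff_py full_source func_line_start filepath diff_hunks context_lines max_lines)

-- ===== LEMMAS AND PROOFS =====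

-- membership in the foldl of Set.update over the hunks
theorem pv_mem_foldl_update {β : Type} (l : List β) (f : β → List Int) (s : PySem.Set Int) (i : Int) :
    i ∈ l.foldl (fun s b => PySem.Set.update s (f b)) s ↔ i ∈ s ∨ ∃ b ∈ l, i ∈ f b := by
  induction l generalizing s with
  | nil => simp
  | cons x xs ih => simp [List.foldl_cons, ih, PySem.Set.mem_update, or_assoc]

theorem pv_nodup_foldl_update {β : Type} (l : List β) (f : β → List Int) (s : PySem.Set Int)
    (hs : s.Nodup) : (l.foldl (fun s b => PySem.Set.update s (f b)) s).Nodup := by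
  induction l generalizing s with
  | nil => exact hs
  | cons x xs ih => exact ih _ (PySem.Set.nodup_update _ _ hs)

theorem pv_nodup_keepSet (lines : List String) (hunks : List (List (String × Int)))
    (fls ctx : Int) : (pvKeepSet lines hunks fls ctx).Nodup := by
  unfold pvKeepSet
  dsimp only
  have h1 := pv_nodup_foldl_update hunks
    (fun hunk => PySem.List.pyRange (max 0 (((PySem.Dict.mk hunk).get? "start").getD 0 - fls - ctx))
      (min (lines.length : Int) (((PySem.Dict.mk hunk).get? "end").getD 0 - fls + ctx + 1)) 1)
    (PySem.Set.update PySem.Set.empty (PySem.List.pyRange 0 (min 2 (lines.length : Int)) 1))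
    (PySem.Set.nodup_update _ _ List.nodup_nil)
  split
  · exact PySem.Set.nodup_add _ _ h1
  · exact h1

theorem pv_mem_keepSet (lines : List String) (hunks : List (List (String × Int)))
    (fls ctx : Int) (i : Int) :
    i ∈ pvKeepSet lines hunks fls ctx ↔
      (0 ≤ i ∧ i < min 2 (lines.length : Int)) ∨
      (∃ h ∈ hunks,
        max 0 (((PySem.Dict.mk h).get? "start").getD 0 - fls - ctx) ≤ i ∧
        i < min (lines.length : Int) (((PySem.Dict.mk h).get? "end").getD 0 - fls + ctx + 1)) ∨
      (lines ≠ [] ∧ i = (lines.length : Int) - 1) := by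
  unfold pvKeepSet
  dsimp only
  have hm := fun s => pv_mem_foldl_update hunks
    (fun hunk => PySem.List.pyRange (max 0 (((PySem.Dict.mk hunk).get? "start").getD 0 - fls - ctx))
      (min (lines.length : Int) (((PySem.Dict.mk hunk).get? "end").getD 0 - fls + ctx + 1)) 1) s i
  split
  · rename_i hne
    have hlen : lines.length ≠ 0 := by simpa using hne
    simp only [PySem.Set.mem_add, hm, PySem.Set.mem_update, PySem.List.mem_pyRange_one,
      PySem.Set.empty, List.not_mem_nil, false_or]
    constructor
    · rintro ((h | ⟨b, hb, hlo, hhi⟩) | h)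
      · left; omega
      · right; left; exact ⟨b, hb, hlo, hhi⟩
      · right; right; exact ⟨hne, h⟩
    · rintro (h | ⟨b, hb, hlo, hhi⟩ | ⟨_, h⟩)
      · left; left; omega
      · left; right; exact ⟨b, hb, hlo, hhi⟩
      · right; exact h
  · rename_i hnil
    have hl : lines = [] := by by_contra hc; exact hnil hc
    subst hl
    simp only [List.length_nil, Nat.cast_zero] at hm
    simp only [hm, PySem.Set.mem_update, PySem.List.mem_pyRange_one,
      PySem.Set.empty, List.not_mem_nil, false_or, List.length_nil, Nat.cast_zero]
    constructor
    · rintro (h | ⟨b, hb, hlo, hhi⟩)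
      · omega
      · right; left; exact ⟨b, hb, hlo, hhi⟩
    · rintro (h | ⟨b, hb, hlo, hhi⟩ | ⟨h, _⟩)
      · omega
      · right; exact ⟨b, hb, hlo, hhi⟩
      · exact absurd rfl h

-- an element of the keep-set is a valid line index
theorem pv_keepSet_bounds (lines : List String) (hunks : List (List (String × Int)))
    (fls ctx : Int) (i : Int) (h : i ∈ pvKeepSet lines hunks fls ctx) :
    0 ≤ i ∧ i < (lines.length : Int) := by
  rw [pv_mem_keepSet] at h
  rcases h with h | ⟨b, _, hlo, hhi⟩ | ⟨hne, h⟩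
  · omega
  · omega
  · have : lines.length ≠ 0 := by simpa using hne
    omega

-- on a valid line index the keep-set and B's predicate agree
theorem pv_kept_iff (lines : List String) (hunks : List (List (String × Int)))
    (fls ctx : Int) (i : Int) (h0 : 0 ≤ i) (hn : i < (lines.length : Int)) :
    pvKept (lines.length : Int) fls ctx hunks i = true ↔
      i ∈ pvKeepSet lines hunks fls ctx := by
  have hne : lines ≠ [] := by
    intro hc; subst hc; simp at hn; omega
  rw [pv_mem_keepSet]
  unfold pvKept
  split
  · rename_i hcase
    simp only [true_iff]
    rcases hcase with hlt | hlast
    · left; exact ⟨h0, hlt⟩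
    · right; right; exact ⟨hne, hlast⟩
  · rename_i hcase
    push Not at hcase
    simp only [List.any_eq_true, decide_eq_true_eq]
    constructor
    · rintro ⟨b, hb, hlohi⟩
      right; left; exact ⟨b, hb, hlohi⟩
    · rintro (h | ⟨b, hb, hlohi⟩ | ⟨_, h⟩)
      · exact absurd h.2 (by omega)
      · exact ⟨b, hb, hlohi⟩
      · exact absurd h (by omega)

-- the sorted keep-set IS the filtered index range
theorem pv_sorted_keepSet (lines : List String) (hunks : List (List (String × Int)))
    (fls ctx : Int) :
    PySem.List.sorted (pvKeepSet lines hunks fls ctx) (fun x => x) false =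
      (PySem.List.pyRange 0 (lines.length : Int) 1).filter (pvKept (lines.length : Int) fls ctx hunks) := by
  apply PySem.List.sorted_eq_of_perm_of_pairwise_lt
  · rw [List.perm_ext_iff_of_nodup
      ((PySem.List.nodup_pyRange_one _ _).filter _) (pv_nodup_keepSet lines hunks fls ctx)]
    intro a
    rw [List.mem_filter, PySem.List.mem_pyRange_one]
    constructor
    · rintro ⟨⟨h0, hn⟩, hk⟩
      exact (pv_kept_iff lines hunks fls ctx a h0 hn).1 hk
    · intro h
      obtain ⟨h0, hn⟩ := pv_keepSet_bounds lines hunks fls ctx a h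
      exact ⟨⟨h0, hn⟩, (pv_kept_iff lines hunks fls ctx a h0 hn).2 h⟩
  · exact (PySem.List.pairwise_lt_pyRange_one _ _).filter _

-- ===== VERDICT (by name: the statement is the Claim_ definition above) =====
theorem trim_source_to_diff_py_spec : Claim_equal_trim_source_to_diff_py := by
  intro full_source func_line_start filepath diff_hunks context_lines max_lines _ _
  unfold Spec_trim_source_to_diff_py trim_source_to_diff_py trim_source_to_diff_py_alt
  by_cases h1 : (((PySem.Str.splitlines full_source).length : Int) ≤ max_lines ∨ diff_hunks.getD [] = [])
  · simp only [h1, if_pos]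
  · simp only [h1, if_neg, not_false_iff]
    by_cases h2 : ((PySem.Dict.mk (diff_hunks.getD [])).get? filepath).getD [] = []
    · simp only [h2, if_pos]
    · simp only [h2, if_neg, not_false_iff]
      rw [pv_sorted_keepSet, PySem.List.foldl_if_eq_foldl_filter]
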